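-- pv_equiv track=rewrite | github.com/SangPK34/Python_CodePTIT | PY01039_Kiem_Tra_So_Dep.py | check
-- ===== SOURCE A (Python) =====
-- def check(s):
--     if len(s) % 2 ==0:
--         for i in range(0, len(s)-2):
--             if(s[i] != s[i+2]):
--                 return False
--         return True
--     else:
--         return s == s[::-1]
-- ===== SOURCE B (Python) =====
-- def check(s):
--     if len(s) % 2:
--         return s == s[::-1]
--     return len(set(s[0::2])) <= 1 and len(set(s[1::2])) <= 1
-- ===== Notes on version B (the rewrite author's own statement) =====
-- stated objective: simpler
-- what changed: The even-length branch's index loop comparing s[i] with s[i+2] is replaced by two strided slices s[0::2] and s[1::2], each reduced to a distinct-character set that must have at most one element; the odd-length palindrome branch is kept.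
import Mathlib
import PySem

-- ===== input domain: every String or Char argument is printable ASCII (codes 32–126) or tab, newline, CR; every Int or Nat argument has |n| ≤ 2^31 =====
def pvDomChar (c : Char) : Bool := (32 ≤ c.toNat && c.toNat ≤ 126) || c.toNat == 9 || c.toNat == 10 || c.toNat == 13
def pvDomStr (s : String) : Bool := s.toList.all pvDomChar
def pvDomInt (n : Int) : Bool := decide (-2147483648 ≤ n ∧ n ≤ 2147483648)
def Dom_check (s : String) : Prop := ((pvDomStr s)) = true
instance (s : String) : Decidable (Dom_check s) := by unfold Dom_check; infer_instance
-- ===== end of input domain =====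

-- B replaces the even-length adjacent s[i]==s[i+2] scan by "each of the two strided
-- subsequences s[0::2], s[1::2] has at most one distinct character"; objective: simpler.

-- ===== PORT A =====
-- the for-loop with early 'return False'
def checkALoop (cs : List Char) : List Int → Bool
  | [] => true
  | i :: rest =>
    if PySem.List.pyGet? cs i ≠ PySem.List.pyGet? cs (i + 2) then false
    else checkALoop cs rest

def check (s : String) : Bool :=
  let cs := s.toList
  if PySem.Int.mod (cs.length : Int) 2 = 0 then
    checkALoop cs (PySem.List.pyRange 0 ((cs.length : Int) - 2) 1)
  else
    decide (some s = PySem.Str.slice? s none none (-1))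

-- ===== PORT B =====
def check_alt (s : String) : Bool :=
  let cs := s.toList
  if PySem.Int.mod (cs.length : Int) 2 ≠ 0 then
    decide (some s = PySem.Str.slice? s none none (-1))
  else
    decide (PySem.Set.len (PySem.Set.ofList ((PySem.List.slice? cs (some 0) none 2).getD [])) ≤ 1)
      && decide (PySem.Set.len (PySem.Set.ofList ((PySem.List.slice? cs (some 1) none 2).getD [])) ≤ 1)

-- ===== PRECONDITION & SPEC =====
def Spec_check (s : String) (out : Bool) : Prop := out = check_alt s
instance (s : String) (out : Bool) : Decidable (Spec_check s out) := by unfold Spec_check; infer_instance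

-- ===== CLAIM (what is proved, stated in full; the proofs are below) =====
def Claim_equal_check : Prop := ∀ (s : String), Dom_check s → Spec_check s (check s)

-- ===== LEMMAS AND PROOFS =====

lemma checkALoop_true_iff (cs : List Char) (is : List Int) :
    checkALoop cs is = true ↔
      ∀ i ∈ is, PySem.List.pyGet? cs i = PySem.List.pyGet? cs (i + 2) := by
  induction is with
  | nil => simp [checkALoop]
  | cons i rest ih =>
    by_cases h : PySem.List.pyGet? cs i = PySem.List.pyGet? cs (i + 2)
    · simp [checkALoop, h, ih]
    · simp [checkALoop, h]

-- A's even branch says: all indices two apart hold equal characters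
lemma A_even_iff (cs : List Char) :
    checkALoop cs (PySem.List.pyRange 0 ((cs.length : Int) - 2) 1) = true ↔
      ∀ k : Nat, k + 2 < cs.length → cs[k]? = cs[k + 2]? := by
  rw [checkALoop_true_iff]
  constructor
  · intro h k hk
    have := h (k : Int) (by rw [PySem.List.mem_pyRange_one]; omega)
    have hcast : ((k : Int) + 2) = ((k + 2 : Nat) : Int) := by push_cast; ring
    rwa [hcast, PySem.List.pyGet?_natCast, PySem.List.pyGet?_natCast] at this
  · intro h i hi
    rw [PySem.List.mem_pyRange_one] at hi
    obtain ⟨k, rfl⟩ : ∃ k : Nat, (k : Int) = i := ⟨i.toNat, by omega⟩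
    have hcast : ((k : Int) + 2) = ((k + 2 : Nat) : Int) := by push_cast; ring
    rw [hcast, PySem.List.pyGet?_natCast, PySem.List.pyGet?_natCast]
    exact h k (by omega)

-- chaining s[k] = s[k+2] down to the parity representative
lemma chain_to_parity (cs : List Char)
    (H : ∀ k : Nat, k + 2 < cs.length → cs[k]? = cs[k + 2]?) :
    ∀ k : Nat, k < cs.length → cs[k]? = cs[k % 2]? := by
  intro k
  induction k using Nat.strong_induction_on with
  | _ k ih =>
    intro hk
    rcases Nat.lt_or_ge k 2 with h2 | h2
    · have : k % 2 = k := Nat.mod_eq_of_lt h2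
      rw [this]
    · obtain ⟨j, rfl⟩ : ∃ j, k = j + 2 := ⟨k - 2, by omega⟩
      have h1 : cs[j]? = cs[j + 2]? := H j hk
      have h3 : cs[j]? = cs[j % 2]? := ih j (by omega) (by omega)
      have : (j + 2) % 2 = j % 2 := by omega
      rw [this, ← h3, ← h1]

-- a Python set has at most one element iff the underlying list is constant
lemma set_len_le_one_iff (xs : List Char) :
    PySem.Set.len (PySem.Set.ofList xs) ≤ 1 ↔ ∀ a ∈ xs, ∀ b ∈ xs, a = b := by
  unfold PySem.Set.len
  constructor
  · intro h a ha b hb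
    rw [← PySem.Set.mem_ofList] at ha hb
    match hE : PySem.Set.ofList xs with
    | [] => rw [hE] at ha; simp at ha
    | [x] => rw [hE] at ha hb; simp at ha hb; rw [ha, hb]
    | x :: y :: t =>
      exfalso
      rw [hE] at h
      simp only [List.length_cons] at h
      omega
  · intro h
    match hE : PySem.Set.ofList xs with
    | [] => simp
    | [x] => simp
    | x :: y :: t =>
      exfalso
      have hx : x ∈ xs := by rw [← PySem.Set.mem_ofList, hE]; simp
      have hy : y ∈ xs := by rw [← PySem.Set.mem_ofList, hE]; simp
      have hnd := PySem.Set.nodup_ofList xs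
      rw [hE] at hnd
      have hne : x ≠ y := by
        intro he; exact (List.nodup_cons.mp hnd).1 (he ▸ List.mem_cons_self ..)
      exact hne (h x hx y hy)

-- membership in the strided slice s[a::2] for a = 0, 1
lemma mem_stride (cs : List Char) (a : Nat) (ha : a ≤ 1) (c : Char) :
    c ∈ (PySem.List.slice? cs (some (a : Int)) none 2).getD [] ↔
      ∃ k : Nat, 2 * k + a < cs.length ∧ cs[2 * k + a]? = some c := by
  unfold PySem.List.slice? PySem.List.sliceIndices
  norm_num
  rw [if_neg (show ¬((a:Int) < 0) by omega)]
  by_cases hc : (a:Int) < (cs.length : Int)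
  · rw [min_eq_left (by omega : (a:Int) ≤ (cs.length:Int)), if_pos hc]
    constructor
    · rintro ⟨k, hk, hsome⟩
      refine ⟨k, by omega, ?_⟩
      have h2 : ((a : Int) + 2 * (k : Nat)).toNat = 2 * k + a := by omega
      rwa [h2] at hsome
    · rintro ⟨k, hk, hsome⟩
      refine ⟨k, by omega, ?_⟩
      have h2 : ((a : Int) + 2 * (k : Nat)).toNat = 2 * k + a := by omega
      rwa [h2]
  · rw [min_eq_right (by omega : (cs.length:Int) ≤ (a:Int)), if_neg (lt_irrefl _)]
    constructor
    · rintro ⟨k, hk, -⟩; omega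
    · rintro ⟨k, hk, -⟩; omega

-- the even-length equivalence, stated on the two Props
lemma even_core (cs : List Char) :
    (∀ k : Nat, k + 2 < cs.length → cs[k]? = cs[k + 2]?) ↔
      ((∀ a ∈ (PySem.List.slice? cs (some 0) none 2).getD [],
          ∀ b ∈ (PySem.List.slice? cs (some 0) none 2).getD [], a = b) ∧
       (∀ a ∈ (PySem.List.slice? cs (some 1) none 2).getD [],
          ∀ b ∈ (PySem.List.slice? cs (some 1) none 2).getD [], a = b)) := by
  have m0 := mem_stride cs 0 (by omega)
  have m1 := mem_stride cs 1 (by omega)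
  simp only [Nat.cast_zero, Nat.cast_one] at m0 m1
  constructor
  · intro H
    have key := chain_to_parity cs H
    constructor
    · intro a ha b hb
      obtain ⟨j, hj, hja⟩ := (m0 a).mp ha
      obtain ⟨k, hk, hkb⟩ := (m0 b).mp hb
      have e1 := key (2 * j + 0) hj
      have e2 := key (2 * k + 0) hk
      have : (2 * j + 0) % 2 = (2 * k + 0) % 2 := by omega
      rw [this] at e1
      rw [hja] at e1; rw [hkb] at e2
      rw [← e2] at e1
      exact Option.some.inj e1
    · intro a ha b hb
      obtain ⟨j, hj, hja⟩ := (m1 a).mp ha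
      obtain ⟨k, hk, hkb⟩ := (m1 b).mp hb
      have e1 := key (2 * j + 1) hj
      have e2 := key (2 * k + 1) hk
      have : (2 * j + 1) % 2 = (2 * k + 1) % 2 := by omega
      rw [this] at e1
      rw [hja] at e1; rw [hkb] at e2
      rw [← e2] at e1
      exact Option.some.inj e1
  · rintro ⟨h0, h1⟩ k hk
    have hk2 : k < cs.length := by omega
    rcases Nat.even_or_odd k with ⟨j, hj⟩ | ⟨j, hj⟩
    · have ha : cs[k]? = some cs[k] := List.getElem?_eq_getElem hk2
      have hb : cs[k + 2]? = some cs[k + 2] := List.getElem?_eq_getElem hk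
      have ia : cs[k] ∈ (PySem.List.slice? cs (some 0) none 2).getD [] :=
        (m0 _).mpr ⟨j, by omega, by rw [show 2 * j + 0 = k by omega]; exact ha⟩
      have ib : cs[k + 2] ∈ (PySem.List.slice? cs (some 0) none 2).getD [] :=
        (m0 _).mpr ⟨j + 1, by omega, by rw [show 2 * (j + 1) + 0 = k + 2 by omega]; exact hb⟩
      rw [ha, hb, h0 _ ia _ ib]
    · have ha : cs[k]? = some cs[k] := List.getElem?_eq_getElem hk2
      have hb : cs[k + 2]? = some cs[k + 2] := List.getElem?_eq_getElem hk
      have ia : cs[k] ∈ (PySem.List.slice? cs (some 1) none 2).getD [] :=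
        (m1 _).mpr ⟨j, by omega, by rw [show 2 * j + 1 = k by omega]; exact ha⟩
      have ib : cs[k + 2] ∈ (PySem.List.slice? cs (some 1) none 2).getD [] :=
        (m1 _).mpr ⟨j + 1, by omega, by rw [show 2 * (j + 1) + 1 = k + 2 by omega]; exact hb⟩
      rw [ha, hb, h1 _ ia _ ib]

-- ===== VERDICT (by name: the statement is the Claim_ definition above) =====
theorem check_spec : Claim_equal_check := by
  intro s _
  unfold Spec_check check check_alt
  by_cases hpar : PySem.Int.mod (s.toList.length : Int) 2 = 0
  · rw [if_pos hpar, if_neg (by simpa using hpar)]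
    rw [Bool.eq_iff_iff]
    rw [A_even_iff]
    simp only [Bool.and_eq_true, decide_eq_true_eq]
    rw [even_core s.toList]
    constructor
    · rintro ⟨h0, h1⟩
      exact ⟨(set_len_le_one_iff _).mpr h0, (set_len_le_one_iff _).mpr h1⟩
    · rintro ⟨h0, h1⟩
      exact ⟨(set_len_le_one_iff _).mp h0, (set_len_le_one_iff _).mp h1⟩
  · rw [if_neg hpar, if_pos hpar]
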